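-- pv_equiv track=rewrite | github.com/QuantAMMProtocol/quantammsim | scripts/plot_reclamm_optuna_result.py | _plot_order
-- ===== SOURCE A (Python) =====
-- def _plot_order(configs):
--     """Yield (name, meta, color_idx) with baselines first, optimized trials last."""
--     optimized = []
--     baselines = []
--     for i, (name, meta) in enumerate(configs.items()):
--         if "On-Chain" in name:
--             baselines.append((name, meta, i))
--         else:
--             optimized.append((name, meta, i))
--     return baselines + optimized
-- ===== SOURCE B (Python) =====
-- def _plot_order(configs):
--     """Yield (name, meta, color_idx) with baselines first, optimized trials last."""
--     items = [(name, meta, i) for i, (name, meta) in enumerate(configs.items())]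
--     return sorted(items, key=lambda t: 0 if "On-Chain" in t[0] else 1)
-- ===== Notes on version B (the rewrite author's own statement) =====
-- stated objective: idiomatic
-- what changed: Replaces the explicit two-list bucketing loop with a single stable sort of the enumerated items keyed 0 for 'On-Chain' baselines and 1 otherwise, so the ordering is produced by sort stability instead of manual partitioning.
import Mathlib
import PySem

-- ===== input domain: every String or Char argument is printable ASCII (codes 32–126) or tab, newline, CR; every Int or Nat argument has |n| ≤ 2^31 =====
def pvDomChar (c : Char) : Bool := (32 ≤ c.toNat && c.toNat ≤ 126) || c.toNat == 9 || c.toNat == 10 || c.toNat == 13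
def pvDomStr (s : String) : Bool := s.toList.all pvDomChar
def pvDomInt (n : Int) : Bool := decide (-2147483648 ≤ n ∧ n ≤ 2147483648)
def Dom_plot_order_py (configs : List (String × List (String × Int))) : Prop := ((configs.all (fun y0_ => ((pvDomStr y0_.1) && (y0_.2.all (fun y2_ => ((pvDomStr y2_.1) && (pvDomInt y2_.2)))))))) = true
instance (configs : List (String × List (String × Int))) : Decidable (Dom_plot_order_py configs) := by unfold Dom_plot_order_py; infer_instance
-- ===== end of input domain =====

-- B replaces A's explicit two-list partition loop with a single stable sort on a 0/1 key (idiomatic; same results).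


-- ===== PORT A =====
-- for i, (name, meta) in enumerate(configs.items()): append to baselines / optimized; return baselines + optimized
def plot_order_py (configs : List (String × List (String × Int))) : List (String × (List (String × Int)) × Int) :=
  let r := (PySem.List.enumerate configs).foldl
    (fun (acc : List (String × (List (String × Int)) × Int) × List (String × (List (String × Int)) × Int)) p =>
      if PySem.Str.isIn "On-Chain" p.2.1 then (acc.1, acc.2 ++ [(p.2.1, p.2.2, p.1)])
      else (acc.1 ++ [(p.2.1, p.2.2, p.1)], acc.2))
    ([], [])
  r.2 ++ r.1

-- ===== PORT B =====
-- items = [(name, meta, i) ...]; sorted(items, key=lambda t: 0 if "On-Chain" in t[0] else 1)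
def plot_order_py_alt (configs : List (String × List (String × Int))) : List (String × (List (String × Int)) × Int) :=
  let items := (PySem.List.enumerate configs).map (fun p => (p.2.1, p.2.2, p.1))
  PySem.List.sorted items (fun t => if PySem.Str.isIn "On-Chain" t.1 then (0 : Int) else 1) false

-- ===== PRECONDITION & SPEC =====
def Spec_plot_order_py (configs : List (String × List (String × Int))) (out : List (String × (List (String × Int)) × Int)) : Prop := out = plot_order_py_alt configs
instance (configs : List (String × List (String × Int))) (out : List (String × (List (String × Int)) × Int)) : Decidable (Spec_plot_order_py configs out) := by unfold Spec_plot_order_py; infer_instance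

-- ===== CLAIM (what is proved, stated in full; the proofs are below) =====
def Claim_equal_plot_order_py : Prop := ∀ (configs : List (String × List (String × Int))), Dom_plot_order_py configs → Spec_plot_order_py configs (plot_order_py configs)

-- ===== LEMMAS AND PROOFS =====

-- insertBy places x after all of `as` (where `before x` is false) and before all of `bs` (where it is true)
theorem insertBy_middle {α : Type} (before : α → α → Bool) (x : α) (as bs : List α)
    (ha : ∀ a ∈ as, before x a = false) (hb : ∀ b ∈ bs, before x b = true) :
    PySem.List.insertBy before x (as ++ bs) = as ++ x :: bs := by
  induction as with
  | nil =>
    cases bs with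
    | nil => simp [PySem.List.insertBy]
    | cons b bs => simp [PySem.List.insertBy, hb b (by simp)]
  | cons a as ih =>
    have := ha a (by simp)
    simp only [List.cons_append, PySem.List.insertBy, this]
    simp [ih (fun a h => ha a (by simp [h])) ]

-- stable sort on a 0/1 key is the stable partition
theorem sorted_binary {α : Type} (p : α → Bool) (xs as bs : List α)
    (ha : ∀ a ∈ as, p a = true) (hb : ∀ b ∈ bs, p b = false) :
    xs.foldl (fun acc x =>
        PySem.List.insertBy (fun a b =>
          decide ((if p a then (0 : Int) else 1) < (if p b then (0 : Int) else 1))) x acc)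
      (as ++ bs)
    = (as ++ xs.filter p) ++ (bs ++ xs.filter (fun x => !p x)) := by
  induction xs generalizing as bs with
  | nil => simp
  | cons x xs ih =>
    simp only [List.foldl_cons]
    by_cases hx : p x = true
    · have hins : PySem.List.insertBy (fun a b =>
          decide ((if p a then (0 : Int) else 1) < (if p b then (0 : Int) else 1))) x (as ++ bs)
          = (as ++ [x]) ++ bs := by
        rw [insertBy_middle]
        · simp
        · intro a hA; simp [hx, ha a hA]
        · intro b hB; simp [hx, hb b hB]
      have ha' : ∀ a ∈ as ++ [x], p a = true := by
        intro a hA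
        rcases List.mem_append.1 hA with h | h
        · exact ha a h
        · simp at h; simpa [h] using hx
      rw [hins, ih (as ++ [x]) bs ha' hb]
      simp [hx]
    · have hx' : p x = false := by simpa using hx
      have hins : PySem.List.insertBy (fun a b =>
          decide ((if p a then (0 : Int) else 1) < (if p b then (0 : Int) else 1))) x (as ++ bs)
          = as ++ (bs ++ [x]) := by
        rw [← List.append_assoc]
        apply PySem.List.insertBy_of_forall_not_before
        intro y hy
        rcases List.mem_append.1 hy with h | h
        · simp only [hx']
          by_cases hp : p y = true <;> simp [hp]
        · simp [hx', hb y h]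
      have hb' : ∀ b ∈ bs ++ [x], p b = false := by
        intro b hB
        rcases List.mem_append.1 hB with h | h
        · exact hb b h
        · simp at h; simpa [h] using hx'
      rw [hins, ih as (bs ++ [x]) ha hb']
      simp [hx']

-- A's two-accumulator fold computes the two filters
theorem foldA {α : Type} (q : α → Bool) (xs : List α) (o b : List α) :
    xs.foldl (fun acc x => if q x then (acc.1, acc.2 ++ [x]) else (acc.1 ++ [x], acc.2)) (o, b)
    = (o ++ xs.filter (fun x => !q x), b ++ xs.filter q) := by
  induction xs generalizing o b with
  | nil => simp
  | cons x xs ih =>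
    simp only [List.foldl_cons]
    by_cases hx : q x = true
    · rw [if_pos hx]; rw [ih]; simp [hx]
    · have hx' : q x = false := by simpa using hx
      rw [if_neg (by simp [hx'])]; rw [ih]; simp [hx']

-- ===== VERDICT (by name: the statement is the Claim_ definition above) =====
theorem plot_order_py_spec : Claim_equal_plot_order_py := by
  intro configs _
  unfold Spec_plot_order_py plot_order_py plot_order_py_alt
  set q : (String × (List (String × Int)) × Int) → Bool :=
    fun t => PySem.Str.isIn "On-Chain" t.1 with hq
  set ys := (PySem.List.enumerate configs).map (fun p => (p.2.1, p.2.2, p.1)) with hys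
  have hA : (PySem.List.enumerate configs).foldl
      (fun (acc : List (String × (List (String × Int)) × Int) × List (String × (List (String × Int)) × Int)) p =>
        if PySem.Str.isIn "On-Chain" p.2.1 then (acc.1, acc.2 ++ [(p.2.1, p.2.2, p.1)])
        else (acc.1 ++ [(p.2.1, p.2.2, p.1)], acc.2))
      ([], [])
      = ys.foldl (fun acc t => if q t then (acc.1, acc.2 ++ [t]) else (acc.1 ++ [t], acc.2)) ([], []) := by
    rw [hys, List.foldl_map]
  have hB : PySem.List.sorted ys (fun t => if q t then (0 : Int) else 1) false
      = ys.filter q ++ ys.filter (fun x => !q x) := by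
    rw [PySem.List.sorted_eq_foldl_insertBy]
    have := sorted_binary q ys [] [] (by simp) (by simp)
    simpa using this
  rw [hA, foldA q ys [] []]
  exact hB.symm
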